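-- pv_equiv track=rewrite | github.com/xgjk/xg-skills | cms-find-skills/scripts/skill_registry/get_skills.py | find_one
-- ===== SOURCE A (Python) =====
-- def find_one(skills: list[dict], query: str) -> dict | None:
--     """按 skillCode 或 displayName 查找单个 Skill。"""
--     q = query.lower()
--
--     for skill in skills:
--         if (skill.get("skillCode") or skill.get("name") or "").lower() == q:
--             return skill
--
--     for skill in skills:
--         if (skill.get("displayName") or "").lower() == q:
--             return skill
--
--     for skill in skills:
--         code = (skill.get("skillCode") or skill.get("name") or "").lower()
--         display = (skill.get("displayName") or "").lower()
--         if q in code or q in display: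
--             return skill
--
--     return None
-- ===== SOURCE B (Python) =====
-- def find_one(skills: list[dict], query: str) -> dict | None:
--     """按 skillCode 或 displayName 查找单个 Skill。"""
--     q = query.lower()
--     cand_code = cand_display = cand_sub = None
--     for skill in skills:
--         code = (skill.get("skillCode") or skill.get("name") or "").lower()
--         display = (skill.get("displayName") or "").lower()
--         if cand_code is None and code == q:
--             cand_code = skill
--         if cand_display is None and display == q:
--             cand_display = skill
--         if cand_sub is None and (q in code or q in display):
--             cand_sub = skill
--     if cand_code is not None:
--         return cand_code
--     if cand_display is not None:
--         return cand_display
--     return cand_sub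
-- ===== Notes on version B (the rewrite author's own statement) =====
-- stated objective: alternative
-- what changed: Replaces A's three sequential scans over skills with one pass that keeps a set-if-unset 'first match' slot per priority tier and picks the highest non-empty slot at the end; it trades repeated scans for a three-slot accumulator.
import Mathlib
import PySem

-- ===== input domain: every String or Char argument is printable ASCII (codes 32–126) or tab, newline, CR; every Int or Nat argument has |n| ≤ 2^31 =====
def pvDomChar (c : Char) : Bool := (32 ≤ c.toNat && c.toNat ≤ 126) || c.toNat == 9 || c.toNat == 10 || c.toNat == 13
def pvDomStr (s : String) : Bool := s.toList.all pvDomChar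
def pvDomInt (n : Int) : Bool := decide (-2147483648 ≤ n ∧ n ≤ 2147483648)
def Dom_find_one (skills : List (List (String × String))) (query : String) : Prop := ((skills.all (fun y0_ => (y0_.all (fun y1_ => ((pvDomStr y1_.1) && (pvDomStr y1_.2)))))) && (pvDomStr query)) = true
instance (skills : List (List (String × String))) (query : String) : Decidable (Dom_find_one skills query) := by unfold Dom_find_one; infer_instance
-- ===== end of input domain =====

-- B replaces A's three sequential scans with one pass keeping a set-if-unset 'first match'
-- slot per priority tier (objective: alternative single-pass decomposition).

-- shared helpers: dict lookup and Python's `x or y` on strings (empty string is falsy)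
def pvGet (skill : List (String × String)) (k : String) : Option String :=
  (PySem.Dict.mk skill).get? k

def pvOrStr (o : Option String) (y : String) : String :=
  match o with
  | some s => if s = "" then y else s
  | none => y

def pvCodeOf (skill : List (String × String)) : String :=
  PySem.Str.lower (pvOrStr (pvGet skill "skillCode") (pvOrStr (pvGet skill "name") ""))

def pvDispOf (skill : List (String × String)) : String :=
  PySem.Str.lower (pvOrStr (pvGet skill "displayName") "")

-- ===== PORT A =====
-- A's first loop: return the first skill whose lowered code equals q
def pvLoop1 (q : String) : List (List (String × String)) → Option (List (String × String))
  | [] => none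
  | skill :: rest => if pvCodeOf skill = q then some skill else pvLoop1 q rest

-- A's second loop: first skill whose lowered displayName equals q
def pvLoop2 (q : String) : List (List (String × String)) → Option (List (String × String))
  | [] => none
  | skill :: rest => if pvDispOf skill = q then some skill else pvLoop2 q rest

-- A's third loop: first skill with q a substring of code or display
def pvLoop3 (q : String) : List (List (String × String)) → Option (List (String × String))
  | [] => none
  | skill :: rest =>
      if PySem.Str.isIn q (pvCodeOf skill) || PySem.Str.isIn q (pvDispOf skill) then some skill
      else pvLoop3 q rest

def find_one (skills : List (List (String × String))) (query : String) : Option (List (String × String)) :=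
  let q := PySem.Str.lower query
  match pvLoop1 q skills with
  | some skill => some skill
  | none =>
    match pvLoop2 q skills with
    | some skill => some skill
    | none => pvLoop3 q skills

-- ===== PORT B =====
-- one fold step: compute code/display once, fill each still-empty slot
def pvStep (q : String)
    (st : Option (List (String × String)) × Option (List (String × String)) × Option (List (String × String)))
    (skill : List (String × String)) :
    Option (List (String × String)) × Option (List (String × String)) × Option (List (String × String)) :=
  let code := pvCodeOf skill
  let display := pvDispOf skill
  let c := if st.1.isNone && (code = q) then some skill else st.1
  let d := if st.2.1.isNone && (display = q) then some skill else st.2.1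
  let s := if st.2.2.isNone && (PySem.Str.isIn q code || PySem.Str.isIn q display) then some skill else st.2.2
  (c, d, s)

def find_one_alt (skills : List (List (String × String))) (query : String) : Option (List (String × String)) :=
  let q := PySem.Str.lower query
  let r := skills.foldl (pvStep q) (none, none, none)
  match r.1 with
  | some skill => some skill
  | none =>
    match r.2.1 with
    | some skill => some skill
    | none => r.2.2

-- ===== PRECONDITION & SPEC =====
def Spec_find_one (skills : List (List (String × String))) (query : String) (out : Option (List (String × String))) : Prop := out = find_one_alt skills query
instance (skills : List (List (String × String))) (query : String) (out : Option (List (String × String))) : Decidable (Spec_find_one skills query out) := by unfold Spec_find_one; infer_instance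

-- ===== CLAIM (what is proved, stated in full; the proofs are below) =====
def Claim_equal_find_one : Prop := ∀ (skills : List (List (String × String))) (query : String), Dom_find_one skills query → Spec_find_one skills query (find_one skills query)

-- ===== LEMMAS AND PROOFS =====
-- B's fold computes, slotwise, "current slot, else the first match A's corresponding loop finds"
theorem pvFold_eq (q : String) (skills : List (List (String × String))) :
    ∀ c d s, skills.foldl (pvStep q) (c, d, s) =
      (c.or (pvLoop1 q skills), d.or (pvLoop2 q skills), s.or (pvLoop3 q skills)) := by
  induction skills with
  | nil => intro c d s; simp [pvLoop1, pvLoop2, pvLoop3]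
  | cons skill rest ih =>
      intro c d s
      simp only [List.foldl, ih]
      simp only [pvStep, pvLoop1, pvLoop2, pvLoop3]
      cases c <;> cases d <;> cases s <;> split_ifs <;> simp_all

theorem find_one_spec : Claim_equal_find_one := by
  intro skills query _
  show find_one skills query = find_one_alt skills query
  simp only [find_one, find_one_alt, pvFold_eq, Option.none_or]
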